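-- pv_equiv track=rewrite | github.com/smwentum/Everyone-Codes | 2024/Pytthon Nov 2024/Day 1/day1.py | getNumberOfPotionsNeeded
-- ===== SOURCE A (Python) =====
-- def getNumberOfPotionsNeeded(incommingCreatrues):
--     count= 0
--     for creature in incommingCreatrues:
--             match creature:
--                 case 'B':
--                     count += 1
--                 case 'C':
--                     count += 3
--                 case 'D':
--                     count += 5
--     return count
-- ===== SOURCE B (Python) =====
-- def getNumberOfPotionsNeeded(incommingCreatrues):
--     creatures = list(incommingCreatrues)
--     return creatures.count('B') + 3 * creatures.count('C') + 5 * creatures.count('D')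
-- ===== Notes on version B (the rewrite author's own statement) =====
-- stated objective: simpler
-- what changed: Replaced the single per-element branching accumulation loop with three staged list.count scans (one per cost character) combined by a closed weighted-sum formula, after materializing the input so iterators are still accepted.
import Mathlib
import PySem

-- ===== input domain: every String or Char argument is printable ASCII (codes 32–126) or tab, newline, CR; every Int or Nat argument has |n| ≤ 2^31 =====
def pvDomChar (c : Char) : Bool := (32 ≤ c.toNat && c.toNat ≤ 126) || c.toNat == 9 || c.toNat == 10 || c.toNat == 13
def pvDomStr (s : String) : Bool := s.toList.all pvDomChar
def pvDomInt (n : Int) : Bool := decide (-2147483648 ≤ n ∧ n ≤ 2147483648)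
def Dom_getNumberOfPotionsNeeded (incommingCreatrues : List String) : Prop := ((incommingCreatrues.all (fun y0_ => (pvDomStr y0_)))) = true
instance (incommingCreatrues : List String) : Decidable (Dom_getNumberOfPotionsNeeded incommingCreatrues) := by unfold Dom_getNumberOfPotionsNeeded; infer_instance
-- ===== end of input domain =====

-- B replaces A's single branching accumulation loop by three staged list.count scans combined by a weighted-sum formula (simpler; same cost).
-- ===== PORT A =====
def getNumberOfPotionsNeeded (incommingCreatrues : List String) : Int :=
  incommingCreatrues.foldl
    (fun count creature =>
      match creature with
      | "B" => count + 1
      | "C" => count + 3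
      | "D" => count + 5
      | _   => count)
    0

-- ===== PORT B =====
def getNumberOfPotionsNeeded_alt (incommingCreatrues : List String) : Int :=
  let creatures := incommingCreatrues
  (PySem.List.count creatures "B" : Int)
    + 3 * (PySem.List.count creatures "C" : Int)
    + 5 * (PySem.List.count creatures "D" : Int)

-- ===== PRECONDITION & SPEC =====
def Spec_getNumberOfPotionsNeeded (incommingCreatrues : List String) (out : Int) : Prop := out = getNumberOfPotionsNeeded_alt incommingCreatrues
instance (incommingCreatrues : List String) (out : Int) : Decidable (Spec_getNumberOfPotionsNeeded incommingCreatrues out) := by unfold Spec_getNumberOfPotionsNeeded; infer_instance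

-- ===== CLAIM =====
def Claim_equal_getNumberOfPotionsNeeded : Prop := ∀ (incommingCreatrues : List String), Dom_getNumberOfPotionsNeeded incommingCreatrues → Spec_getNumberOfPotionsNeeded incommingCreatrues (getNumberOfPotionsNeeded incommingCreatrues)

-- ===== LEMMAS AND PROOFS =====
-- A's loop in closed form: weighted sum of occurrence counts.
theorem foldA_counts (xs : List String) (init : Int) :
    xs.foldl
      (fun count creature =>
        match creature with
        | "B" => count + 1
        | "C" => count + 3
        | "D" => count + 5
        | _   => count)
      init
    = init + xs.count "B" + 3 * xs.count "C" + 5 * xs.count "D" := by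
  induction xs generalizing init with
  | nil => simp
  | cons x xs ih =>
    simp only [List.foldl_cons, ih, List.count_cons]
    by_cases hB : x = "B" <;> by_cases hC : x = "C" <;> by_cases hD : x = "D" <;>
      simp_all <;> ring

-- ===== VERDICT =====
theorem getNumberOfPotionsNeeded_spec : Claim_equal_getNumberOfPotionsNeeded := by
  intro xs _
  unfold Spec_getNumberOfPotionsNeeded getNumberOfPotionsNeeded getNumberOfPotionsNeeded_alt
  simp only [PySem.List.count_eq, foldA_counts]
  ring
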